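-- pv_equiv track=rewrite | github.com/every-algorithm/python | math/robinsonschenstedknuth_correspondence.py | rsk
-- ===== SOURCE A (Python) =====
-- def rsk(matrix):
--     """
--     Perform the RSK correspondence on a non‑negative integer matrix.
--     Returns a tuple (P, Q) where each is a list of lists representing a tableau.
--     """
--     P = []  # P tableau
--     Q = []  # Q tableau
--     # Iterate over columns
--     for col_idx, col in enumerate(zip(*matrix)):
--         # Iterate over rows
--         for row_idx, val in enumerate(col):
--             for _ in range(val):
--                 r, c = _row_insert(P, row_idx + 1)  # insert 1‑based row index
--                 _q_insert(Q, r, col_idx + 1)        # record 1‑based column index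
--     return P, Q
--
-- def _row_insert(tableau, value):
--     """
--     Insert a value into a tableau using row insertion.
--     Returns the position (row, col) where the value ends up.
--     """
--     row = 0
--     bumped = value
--     while True:
--         # Ensure the current row exists
--         if row >= len(tableau):
--             tableau.append([])
--         current_row = tableau[row]
--         pos = None
--         for idx, x in enumerate(current_row):
--             if x >= bumped:
--                 pos = idx
--                 break
--         if pos is not None:
--             # Bump the element
--             current_row[pos], bumped = bumped, current_row[pos]
--             row += 1
--             continue
--         else:
--             # Append bumped at the end
--             current_row.append(bumped)
--             return row, len(current_row) - 1
--
-- def _q_insert(q_tableau, row, value):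
--     """
--     Insert a value into the Q tableau at the given row.
--     Always appends to the end of the row (BUG: should insert at correct column).
--     """
--     while row >= len(q_tableau):
--         q_tableau.append([])
--     q_tableau[row].append(value)
-- ===== SOURCE B (Python) =====
-- def _levels(pairs):
--     """Build P and Q one tableau ROW at a time: sweep all pairs through a single
--     row, collecting the bumped pairs in order, and recurse on them for the
--     deeper rows (level-by-level RSK instead of a per-letter bump cascade)."""
--     if not pairs:
--         return [], []
--     row, qrow, nxt = [], [], []
--     for x, lab in pairs:
--         for k in range(len(row)):
--             if row[k] >= x:
--                 nxt.append((row[k], lab))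
--                 row[k] = x
--                 break
--         else:
--             row.append(x)
--             qrow.append(lab)
--     p_rest, q_rest = _levels(nxt)
--     return [row] + p_rest, [qrow] + q_rest
--
--
-- def rsk(matrix):
--     ncols = min((len(row) for row in matrix), default=0)
--     biword = [(i + 1, j + 1)
--               for j in range(ncols)
--               for i in range(len(matrix))
--               for _ in range(matrix[i][j])]
--     return _levels(biword)
-- ===== Notes on version B (the rewrite author's own statement) =====
-- stated objective: alternative
-- what changed: B computes the tableaux level by level: it builds the biword once, sweeps the entire word through a single row (collecting the bumped pairs in order) and recurses on that bumped subword for the deeper rows, so each recursion level produces one complete row of P and of Q, instead of A's interleaved triple loop that cascades every single letter through all rows before reading the next one.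
import Mathlib
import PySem

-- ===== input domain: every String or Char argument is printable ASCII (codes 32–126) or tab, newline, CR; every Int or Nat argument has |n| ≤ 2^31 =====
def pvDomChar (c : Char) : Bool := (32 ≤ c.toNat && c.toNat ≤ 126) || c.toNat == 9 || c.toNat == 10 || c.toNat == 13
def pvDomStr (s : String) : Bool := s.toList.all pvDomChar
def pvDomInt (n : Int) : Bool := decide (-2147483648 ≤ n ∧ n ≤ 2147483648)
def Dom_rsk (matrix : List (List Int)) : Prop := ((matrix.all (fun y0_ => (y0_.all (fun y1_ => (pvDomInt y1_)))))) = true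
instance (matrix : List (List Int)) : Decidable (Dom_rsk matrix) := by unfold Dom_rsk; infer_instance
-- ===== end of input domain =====

-- B replaces A's per-letter bump cascade by a level-by-level recursion: the whole biword is
-- swept through one tableau row, the bumped pairs (in order) become the word of the next row;
-- same values, similar cost. (A mutates only its own local lists; the input is not mutated.)

-- ===== PORT A =====

-- zip(*matrix): repeatedly take the heads of all rows, stopping when some row runs out
def pyZipT (m : List (List Int)) : List (List Int) :=
  match m with
  | [] => []
  | r :: rs =>
    if (r :: rs).all (fun row => !row.isEmpty) then
      ((r :: rs).map (fun row => row.headD 0)) :: pyZipT ((r :: rs).map List.tail)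
    else []
termination_by (m.headD []).length
decreasing_by
  simp only [List.all_cons, Bool.and_eq_true, List.all_eq_true] at *
  simp only [List.map_cons, List.headD_cons]
  cases r with
  | nil => simp at *
  | cons a t => simp

-- _row_insert: while-loop over rows becomes structural recursion on the tableau suffix;
-- the enumerate-and-break scan for the first x >= bumped is List.findIdx?.
def rowInsertA (tableau : List (List Int)) (bumped : Int) : List (List Int) × Nat × Nat :=
  match tableau with
  | [] =>
    ([[bumped]], 0, ([] ++ [bumped] : List Int).length - 1)
  | cur :: rest =>
    match cur.findIdx? (fun x => bumped ≤ x) with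
    | some pos =>
      let res := rowInsertA rest (cur.getD pos 0)
      ((cur.set pos bumped) :: res.1, res.2.1 + 1, res.2.2)
    | none => ((cur ++ [bumped]) :: rest, 0, (cur ++ [bumped]).length - 1)

-- _q_insert: pad with empty rows while row >= len, then append value to row `row`
def qInsertA (q : List (List Int)) (row : Nat) (v : Int) : List (List Int) :=
  if row < q.length then q.set row (q.getD row [] ++ [v])
  else qInsertA (q ++ [[]]) row v
termination_by row + 1 - q.length
decreasing_by simp_all; omega

def rsk (matrix : List (List Int)) : List (List Int) × List (List Int) :=
  (PySem.List.enumerate (pyZipT matrix) 0).foldl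
    (fun PQ cj =>
      (PySem.List.enumerate cj.2 0).foldl
        (fun PQ rv =>
          (List.range rv.2.toNat).foldl
            (fun PQ _ =>
              let res := rowInsertA PQ.1 (rv.1 + 1)
              (res.1, qInsertA PQ.2 res.2.1 (cj.1 + 1)))
            PQ)
        PQ)
    ([], [])

-- ===== PORT B =====

-- one step of the `for x, lab in pairs` sweep over a single row; state = (row, qrow, nxt);
-- the for-k-range-break scan for the first row[k] >= x is List.findIdx?
def rowStep (st : List Int × List Int × List (Int × Int)) (p : Int × Int) :
    List Int × List Int × List (Int × Int) :=
  match st.1.findIdx? (fun y => p.1 ≤ y) with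
  | some k => (st.1.set k p.1, st.2.1, st.2.2 ++ [(st.1.getD k 0, p.2)])
  | none => (st.1 ++ [p.1], st.2.1 ++ [p.2], st.2.2)

-- termination helper for `_levels`: the sweep adds at most one pair per letter to `nxt`
theorem rowStep_nxt_len : ∀ (w : List (Int × Int)) (st : List Int × List Int × List (Int × Int)),
    ((w.foldl rowStep st).2.2).length ≤ st.2.2.length + w.length := by
  intro w
  induction w with
  | nil => intro st; simp
  | cons p w ih =>
    intro st
    refine le_trans (ih (rowStep st p)) ?_
    unfold rowStep
    cases h : st.1.findIdx? (fun y => p.1 ≤ y) with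
    | some k => simp; omega
    | none => simp

-- _levels: recursion on the bumped subword, one tableau row per level
def levels (pairs : List (Int × Int)) : List (List Int) × List (List Int) :=
  match pairs with
  | [] => ([], [])
  | p :: ps =>
    let st := (p :: ps).foldl rowStep ([], [], [])
    let r := levels st.2.2
    (st.1 :: r.1, st.2.1 :: r.2)
termination_by pairs.length
decreasing_by
  have h1 : rowStep ([], [], []) p = ([p.1], [p.2], []) := by
    simp [rowStep]
  simp only [List.foldl_cons, h1]
  have := rowStep_nxt_len ps ([p.1], [p.2], [])
  simp at this
  simp
  omega

def rsk_alt (matrix : List (List Int)) : List (List Int) × List (List Int) :=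
  let ncols := ((matrix.map (fun r => r.length)).min?).getD 0
  let nrows := matrix.length
  let biword := (List.range ncols).flatMap (fun j =>
      (List.range nrows).flatMap (fun i =>
        List.replicate ((matrix.getD i []).getD j 0).toNat ((i : Int) + 1, (j : Int) + 1)))
  levels biword

-- ===== PRECONDITION & SPEC =====
def Spec_rsk (matrix : List (List Int)) (out : List (List Int) × List (List Int)) : Prop := out = rsk_alt matrix
instance (matrix : List (List Int)) (out : List (List Int) × List (List Int)) : Decidable (Spec_rsk matrix out) := by unfold Spec_rsk; infer_instance

-- ===== CLAIM (what is proved, stated in full; the proofs are below) =====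
def Claim_equal_rsk : Prop := ∀ (matrix : List (List Int)), Dom_rsk matrix → Spec_rsk matrix (rsk matrix)

-- ===== LEMMAS AND PROOFS =====

-- A's per-letter step (one full row insertion plus the Q append)
def stepA (PQ : List (List Int) × List (List Int)) (ab : Int × Int) :
    List (List Int) × List (List Int) :=
  let res := rowInsertA PQ.1 ab.1
  (res.1, qInsertA PQ.2 res.2.1 ab.2)

-- qInsertA commutes with cons (padding and setting both do)
theorem qInsertA_eq (q : List (List Int)) (row : Nat) (v : Int) :
    qInsertA q row v =
      if row < q.length then q.set row (q.getD row [] ++ [v])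
      else qInsertA (q ++ [[]]) row v := by
  rw [qInsertA]

theorem qInsertA_cons : ∀ (m : Nat) (q0 : List Int) (qs : List (List Int)) (i : Nat) (v : Int),
    i ≤ qs.length + m → qInsertA (q0 :: qs) (i + 1) v = q0 :: qInsertA qs i v := by
  intro m
  induction m with
  | zero =>
    intro q0 qs i v h
    by_cases hi : i < qs.length
    · rw [qInsertA_eq (q0 :: qs) (i + 1) v, if_pos (by simp; omega),
          qInsertA_eq qs i v, if_pos hi]
      simp [List.getD]
    · have hie : i = qs.length := by omega
      subst hie
      rw [qInsertA_eq (q0 :: qs) (qs.length + 1) v, if_neg (by simp),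
          qInsertA_eq ((q0 :: qs) ++ [[]]) (qs.length + 1) v, if_pos (by simp),
          qInsertA_eq qs qs.length v, if_neg (by omega),
          qInsertA_eq (qs ++ [[]]) qs.length v, if_pos (by simp)]
      have e1 : (q0 :: qs) ++ [[]] = q0 :: (qs ++ [[]]) := by simp
      rw [e1]
      simp [List.getD]
  | succ m ih =>
    intro q0 qs i v h
    by_cases hi : i ≤ qs.length + m
    · exact ih q0 qs i v hi
    · rw [qInsertA_eq (q0 :: qs) (i + 1) v, if_neg (by simp; omega),
          qInsertA_eq qs i v, if_neg (by omega)]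
      have e1 : (q0 :: qs) ++ [[]] = q0 :: (qs ++ [[]]) := by simp
      rw [e1, ih q0 (qs ++ [[]]) i v (by simp; omega)]

theorem qInsertA_cons' (q0 : List Int) (qs : List (List Int)) (i : Nat) (v : Int) :
    qInsertA (q0 :: qs) (i + 1) v = q0 :: qInsertA qs i v :=
  qInsertA_cons i q0 qs i v (by omega)

theorem qInsertA_zero (q0 : List Int) (qs : List (List Int)) (v : Int) :
    qInsertA (q0 :: qs) 0 v = (q0 ++ [v]) :: qs := by
  rw [qInsertA_eq (q0 :: qs) 0 v, if_pos (by simp)]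
  simp [List.getD]

-- stepA on a cons tableau, split on the scan result
theorem stepA_cons_some (r q0 : List Int) (rs qs : List (List Int)) (x lab : Int) (k : Nat)
    (h : r.findIdx? (fun y => x ≤ y) = some k) :
    stepA (r :: rs, q0 :: qs) (x, lab) =
      ((r.set k x) :: (stepA (rs, qs) (r.getD k 0, lab)).1,
       q0 :: (stepA (rs, qs) (r.getD k 0, lab)).2) := by
  simp only [stepA, rowInsertA, h, qInsertA_cons']

theorem stepA_cons_none (r q0 : List Int) (rs qs : List (List Int)) (x lab : Int)
    (h : r.findIdx? (fun y => x ≤ y) = none) :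
    stepA (r :: rs, q0 :: qs) (x, lab) = ((r ++ [x]) :: rs, (q0 ++ [lab]) :: qs) := by
  simp only [stepA, rowInsertA, h, qInsertA_zero]

-- nxt is a pure accumulator of the sweep
theorem rowStep_acc : ∀ (w : List (Int × Int)) (row q : List Int) (na : List (Int × Int)),
    w.foldl rowStep (row, q, na) =
      ((w.foldl rowStep (row, q, [])).1, (w.foldl rowStep (row, q, [])).2.1,
       na ++ (w.foldl rowStep (row, q, [])).2.2) := by
  intro w
  induction w with
  | nil => intro row q na; simp
  | cons p w ih =>
    intro row q na
    cases h : row.findIdx? (fun y => p.1 ≤ y) with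
    | some k =>
      have hs : ∀ na' : List (Int × Int),
          rowStep (row, q, na') p = (row.set k p.1, q, na' ++ [(row.getD k 0, p.2)]) := by
        intro na'; simp [rowStep, h]
      simp only [List.foldl_cons, hs]
      rw [ih (row.set k p.1) q (na ++ [(row.getD k 0, p.2)]),
          ih (row.set k p.1) q ([] ++ [(row.getD k 0, p.2)])]
      simp
    | none =>
      have hs : ∀ na' : List (Int × Int),
          rowStep (row, q, na') p = (row ++ [p.1], q ++ [p.2], na') := by
        intro na'; simp [rowStep, h]
      simp only [List.foldl_cons, hs]
      exact ih (row ++ [p.1]) (q ++ [p.2]) na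

-- the commutation: folding A's cascade over a word on a cons tableau = one sweep
-- through the top row, then folding the bumped word on the deeper rows
theorem L : ∀ (w : List (Int × Int)) (r q0 : List Int) (rs qs : List (List Int)),
    w.foldl stepA (r :: rs, q0 :: qs) =
      ((w.foldl rowStep (r, q0, [])).1 ::
         ((w.foldl rowStep (r, q0, [])).2.2.foldl stepA (rs, qs)).1,
       (w.foldl rowStep (r, q0, [])).2.1 ::
         ((w.foldl rowStep (r, q0, [])).2.2.foldl stepA (rs, qs)).2) := by
  intro w
  induction w with
  | nil => intro r q0 rs qs; simp
  | cons p w ih =>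
    intro r q0 rs qs
    obtain ⟨x, lab⟩ := p
    simp only [List.foldl_cons]
    cases h : r.findIdx? (fun y => x ≤ y) with
    | some k =>
      rw [stepA_cons_some r q0 rs qs x lab k h,
          ih (r.set k x) q0 (stepA (rs, qs) (r.getD k 0, lab)).1
            (stepA (rs, qs) (r.getD k 0, lab)).2]
      have hrw : rowStep (r, q0, []) (x, lab) = (r.set k x, q0, [(r.getD k 0, lab)]) := by
        simp [rowStep, h]
      rw [hrw, rowStep_acc w (r.set k x) q0 [(r.getD k 0, lab)]]
      simp only [List.singleton_append, List.foldl_cons]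
    | none =>
      have hrw : rowStep (r, q0, []) (x, lab) = (r ++ [x], q0 ++ [lab], []) := by
        simp [rowStep, h]
      rw [stepA_cons_none r q0 rs qs x lab h, hrw]
      exact ih (r ++ [x]) (q0 ++ [lab]) rs qs


-- A's fold from the empty tableau computes levels
theorem fold_levels : ∀ (n : Nat) (w : List (Int × Int)), w.length ≤ n →
    w.foldl stepA ([], []) = levels w := by
  intro n
  induction n with
  | zero =>
    intro w h
    have : w = [] := List.length_eq_zero_iff.mp (by omega)
    subst this; simp [levels]
  | succ n ih =>
    intro w h
    cases w with
    | nil => simp [levels]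
    | cons p ps =>
      have hstep : stepA ([], []) p = ([[p.1]], [[p.2]]) := by
        obtain ⟨x, lab⟩ := p
        simp [stepA, rowInsertA, qInsertA]
      simp only [List.foldl_cons, hstep]
      rw [L ps [p.1] [p.2] [] []]
      have hlen : ((ps.foldl rowStep ([p.1], [p.2], [])).2.2).length ≤ ps.length := by
        have := rowStep_nxt_len ps ([p.1], [p.2], [])
        simpa using this
      rw [ih _ (by simp at h; omega)]
      rw [levels]
      have h1 : rowStep ([], [], []) p = ([p.1], [p.2], []) := by simp [rowStep]
      simp only [List.foldl_cons, h1]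

-- ===== reused machinery relating A's port to the biword fold =====

theorem min_len_map_tail (r : List Int) (rs : List (List Int))
    (hall : (r :: rs).all (fun row => !row.isEmpty) = true) :
    ((((r :: rs).map List.tail).map (fun q => q.length)).min?).getD 0 + 1 =
    (((r :: rs).map (fun q => q.length)).min?).getD 0 := by
  have hne : ((r :: rs).map (fun q : List Int => q.length)) ≠ [] := by simp
  obtain ⟨a, ha⟩ : ∃ a, ((r :: rs).map (fun q : List Int => q.length)).min? = some a := by
    cases h : ((r :: rs).map (fun q : List Int => q.length)).min? with
    | none => exact absurd (List.min?_eq_none_iff.mp h) hne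
    | some a => exact ⟨a, rfl⟩
  obtain ⟨hmem, hle⟩ := List.min?_eq_some_iff.mp ha
  have hpos : 1 ≤ a := by
    simp only [List.mem_map] at hmem
    obtain ⟨q, hq, rfl⟩ := hmem
    simp only [List.all_eq_true] at hall
    have := hall q hq
    simp only [Bool.not_eq_true', List.isEmpty_eq_false_iff] at this
    exact List.length_pos_iff.mpr this
  have ha' : (((r :: rs).map List.tail).map (fun q : List Int => q.length)).min? = some (a - 1) := by
    rw [List.min?_eq_some_iff]
    constructor
    · simp only [List.map_map, List.mem_map] at hmem ⊢
      obtain ⟨q, hq, hlen⟩ := hmem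
      exact ⟨q, hq, by simp [Function.comp, List.length_tail, hlen]⟩
    · intro b hb
      simp only [List.map_map, List.mem_map] at hb
      obtain ⟨q, hq, hlen⟩ := hb
      have := hle q.length (by exact List.mem_map.mpr ⟨q, hq, rfl⟩)
      simp only [Function.comp, List.length_tail] at hlen
      omega
  rw [ha, ha']
  simp
  omega

theorem min_len_zero (m : List (List Int)) (hne : m ≠ [])
    (hemp : ¬ (m.all (fun row => !row.isEmpty) = true)) :
    (((m.map (fun q => q.length)).min?).getD 0 : Nat) = 0 := by
  simp only [List.all_eq_true, not_forall] at hemp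
  obtain ⟨q, hq, hq2⟩ := hemp
  have h0 : (0 : Nat) ∈ m.map (fun q : List Int => q.length) := by
    refine List.mem_map.mpr ⟨q, hq, ?_⟩
    simp only [Bool.not_eq_true'] at hq2
    simp only [Bool.not_eq_false] at hq2
    simp [List.isEmpty_iff.mp hq2]
  obtain ⟨a, ha⟩ : ∃ a, (m.map (fun q : List Int => q.length)).min? = some a := by
    cases h : (m.map (fun q : List Int => q.length)).min? with
    | none => exact absurd (List.min?_eq_none_iff.mp h) (by simpa using hne)
    | some a => exact ⟨a, rfl⟩
  obtain ⟨_, hle⟩ := List.min?_eq_some_iff.mp ha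
  have := hle 0 h0
  rw [ha]
  simpa using this

theorem pyZipT_eq (m : List (List Int)) :
    pyZipT m = (List.range (((m.map (fun r => r.length)).min?).getD 0)).map
      (fun j => m.map (fun r => r.getD j 0)) := by
  induction m using pyZipT.induct with
  | case1 => simp [pyZipT]
  | case2 r rs hall ih =>
    rw [pyZipT, if_pos hall, ih, ← min_len_map_tail r rs hall]
    generalize ((((r :: rs).map List.tail).map (fun q => q.length)).min?).getD 0 = k
    rw [List.range_succ_eq_map]
    simp only [List.map_cons, List.map_map]
    congr 1
    · have h0 : ∀ row : List Int, row.head?.getD 0 = row[0]?.getD 0 := by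
        intro row; cases row <;> rfl
      simp [h0]
    · refine List.map_congr_left ?_
      intro j _
      simp [Function.comp, Nat.succ_eq_add_one]
  | case3 r rs hall =>
    rw [pyZipT, if_neg hall]
    rw [min_len_zero (r :: rs) (by simp) hall]
    simp

theorem enum_range_map {β : Type} (f : Nat → β) (n : Nat) :
    PySem.List.enumerate ((List.range n).map f) 0 =
      (List.range n).map (fun (j : Nat) => ((j : Int), f j)) := by
  induction n with
  | zero => simp [PySem.List.enumerate_nil]
  | succ n ih =>
    rw [List.range_succ, List.map_append, List.map_append,
      PySem.List.enumerate_append, ih]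
    simp [PySem.List.enumerate_cons, PySem.List.enumerate_nil]

theorem enum_map {α β : Type} (g : α → β) : ∀ (l : List α) (s : Int),
    PySem.List.enumerate (l.map g) s = (PySem.List.enumerate l s).map (fun p => (p.1, g p.2)) := by
  intro l
  induction l with
  | nil => intro s; simp [PySem.List.enumerate_nil]
  | cons a l ih =>
    intro s
    simp [PySem.List.enumerate_cons, ih]

theorem enum_eq (l : List (List Int)) :
    PySem.List.enumerate l 0 =
      (List.range l.length).map (fun (i : Nat) => ((i : Int), l.getD i [])) := by
  rw [PySem.List.enumerate_eq_map_pyRange l []]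
  simp only [PySem.List.len_eq, PySem.List.pyRange_zero_natCast, List.map_map]
  refine List.map_congr_left ?_
  intro i _
  simp [Function.comp, PySem.List.pyGetD_natCast]

theorem foldl_flatMap {α β σ : Type} (g : α → List β) (f : σ → β → σ) :
    ∀ (l : List α) (s : σ),
      (l.flatMap g).foldl f s = l.foldl (fun s a => (g a).foldl f s) s := by
  intro l
  induction l with
  | nil => intro s; rfl
  | cons a l ih =>
    intro s
    simp only [List.flatMap_cons, List.foldl_append, List.foldl_cons, ih]

theorem foldl_replicate {β σ : Type} (x : β) (f : σ → β → σ) :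
    ∀ (n : Nat) (s : σ),
      (List.replicate n x).foldl f s = (List.range n).foldl (fun s _ => f s x) s := by
  have hconst : ∀ (g : σ → σ) (l : List Nat) (s : σ),
      l.foldl (fun s _ => g s) s = g^[l.length] s := by
    intro g l
    induction l with
    | nil => intro s; rfl
    | cons a l ih =>
      intro s
      simp only [List.foldl_cons, List.length_cons, ih, Function.iterate_succ_apply]
  intro n
  induction n with
  | zero => intro s; rfl
  | succ n ih =>
    intro s
    simp only [List.replicate_succ, List.foldl_cons, ih (f s x),
      hconst (fun s => f s x), List.length_range]
    exact (Function.iterate_succ_apply (fun s => f s x) n s).symm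

theorem foldl_fcongr {α σ : Type} {f g : σ → α → σ} (l : List α) (s : σ)
    (h : ∀ s a, f s a = g s a) : l.foldl f s = l.foldl g s := by
  have hfg : f = g := funext fun s => funext fun a => h s a
  rw [hfg]

theorem rsk_fold (m : List (List Int)) :
    rsk m = ((List.range (((m.map (fun r => r.length)).min?).getD 0)).flatMap (fun j =>
        (List.range m.length).flatMap (fun i =>
          List.replicate ((m.getD i []).getD j 0).toNat ((i : Int) + 1, (j : Int) + 1)))).foldl
      stepA ([], []) := by
  rw [foldl_flatMap]
  unfold rsk
  rw [pyZipT_eq m, enum_range_map, List.foldl_map]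
  refine foldl_fcongr _ _ ?_
  intro PQ j
  dsimp only
  rw [foldl_flatMap, enum_map, enum_eq, List.map_map, List.foldl_map]
  refine foldl_fcongr _ _ ?_
  intro PQ2 i
  dsimp only [Function.comp]
  rw [foldl_replicate]
  rfl

theorem rsk_eq_alt (m : List (List Int)) : rsk m = rsk_alt m := by
  rw [rsk_fold]
  unfold rsk_alt
  exact fold_levels _ _ (le_refl _)

-- ===== VERDICT (by name: the statement is the Claim_ definition above) =====
theorem rsk_spec : Claim_equal_rsk := by
  intro matrix _
  unfold Spec_rsk
  exact rsk_eq_alt matrix
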